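-- pv_equiv track=rewrite | github.com/Maddy23032/CTS-Hackathon | backend/crawler.py | _is_irrelevant
-- ===== SOURCE A (Python) =====
-- def _is_irrelevant(url):
--     irrelevant_extensions = ['.pdf', '.zip', '.jpg', '.png', '.gif', '.css', '.js', '.ico', '.svg']
--     irrelevant_keywords = ['logout', 'twitter.com', 'facebook.com', 'linkedin.com', 'instagram.com', 'mailto:', 'javascript:']
--     url_lower = url.lower()
--     if any(ext in url_lower for ext in irrelevant_extensions):
--         return True
--     if any(keyword in url_lower for keyword in irrelevant_keywords):
--         return True
--     return False
-- ===== SOURCE B (Python) =====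
-- def _is_irrelevant(url):
--     terms = ['.pdf', '.zip', '.jpg', '.png', '.gif', '.css', '.js', '.ico', '.svg',
--              'logout', 'twitter.com', 'facebook.com', 'linkedin.com', 'instagram.com',
--              'mailto:', 'javascript:']
--     u = url.lower()
--     for i in range(len(u) + 1):
--         for t in terms:
--             if u.startswith(t, i):
--                 return True
--     return False
-- ===== Notes on version B (the rewrite author's own statement) =====
-- stated objective: alternative
-- what changed: Replaces the two term-major any(term in url) substring scans by a single position-major left-to-right scan that checks at each position whether any of the combined terms starts there.
import Mathlib
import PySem

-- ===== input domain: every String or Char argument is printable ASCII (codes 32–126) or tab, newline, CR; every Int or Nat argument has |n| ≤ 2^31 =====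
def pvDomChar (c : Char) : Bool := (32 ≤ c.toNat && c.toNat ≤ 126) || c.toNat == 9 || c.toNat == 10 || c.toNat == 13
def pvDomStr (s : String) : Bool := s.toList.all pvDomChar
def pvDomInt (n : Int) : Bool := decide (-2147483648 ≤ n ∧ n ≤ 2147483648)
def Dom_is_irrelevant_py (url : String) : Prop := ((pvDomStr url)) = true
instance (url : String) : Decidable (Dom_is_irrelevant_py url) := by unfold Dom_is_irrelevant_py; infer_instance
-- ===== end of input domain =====

-- B replaces the two term-major `any(term in url)` scans by one position-major scan over the
-- lowered url, checking at each suffix whether any combined term starts there (alternative, same cost).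


-- ===== PORT A =====
def pvExtsA : List String := [".pdf", ".zip", ".jpg", ".png", ".gif", ".css", ".js", ".ico", ".svg"]
def pvKwsA : List String := ["logout", "twitter.com", "facebook.com", "linkedin.com", "instagram.com", "mailto:", "javascript:"]

def is_irrelevant_py (url : String) : Bool :=
  let url_lower := PySem.Str.lower url
  if pvExtsA.any (fun ext => PySem.Str.isIn ext url_lower) then true
  else if pvKwsA.any (fun keyword => PySem.Str.isIn keyword url_lower) then true
  else false

-- ===== PORT B =====
def pvTermsB : List (List Char) :=
  [".pdf", ".zip", ".jpg", ".png", ".gif", ".css", ".js", ".ico", ".svg",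
   "logout", "twitter.com", "facebook.com", "linkedin.com", "instagram.com",
   "mailto:", "javascript:"].map String.toList

-- one pass over the suffixes of u (= the positions i of Source B's range loop)
def pvScanB (u : List Char) : Bool :=
  match u with
  | [] => pvTermsB.any (fun t => t.isPrefixOf [])
  | c :: rest => pvTermsB.any (fun t => t.isPrefixOf (c :: rest)) || pvScanB rest

def is_irrelevant_py_alt (url : String) : Bool :=
  pvScanB (PySem.Str.lower url).toList

-- ===== PRECONDITION & SPEC =====
def Spec_is_irrelevant_py (url : String) (out : Bool) : Prop := out = is_irrelevant_py_alt url
instance (url : String) (out : Bool) : Decidable (Spec_is_irrelevant_py url out) := by unfold Spec_is_irrelevant_py; infer_instance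

-- ===== CLAIM (what is proved, stated in full; the proofs are below) =====
def Claim_equal_is_irrelevant_py : Prop := ∀ (url : String), Dom_is_irrelevant_py url → Spec_is_irrelevant_py url (is_irrelevant_py url)

-- ===== LEMMAS AND PROOFS =====

-- the position-major scan finds exactly the terms that occur as infix somewhere
theorem pvScanB_iff (u : List Char) : pvScanB u = true ↔ ∃ t ∈ pvTermsB, t <:+: u := by
  induction u with
  | nil =>
      simp [pvScanB, List.any_eq_true, List.isPrefixOf_iff_prefix]
  | cons c rest ih =>
      simp only [pvScanB, Bool.or_eq_true, List.any_eq_true, List.isPrefixOf_iff_prefix, ih,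
        List.infix_cons_iff]
      constructor
      · rintro (⟨t, ht, hp⟩ | ⟨t, ht, hi⟩)
        · exact ⟨t, ht, Or.inl hp⟩
        · exact ⟨t, ht, Or.inr hi⟩
      · rintro ⟨t, ht, hp | hi⟩
        · exact Or.inl ⟨t, ht, hp⟩
        · exact Or.inr ⟨t, ht, hi⟩

-- A's two any-scans, as one existential over the combined term list
theorem pvAny_isIn_iff (l : List String) (s : String) :
    l.any (fun t => PySem.Str.isIn t s) = true ↔ ∃ t ∈ l.map String.toList, t <:+: s.toList := by
  simp only [List.any_eq_true, List.mem_map]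
  constructor
  · rintro ⟨t, ht, h⟩
    refine ⟨t.toList, ⟨t, ht, rfl⟩, ?_⟩
    rw [PySem.Str.isIn_eq] at h
    exact (PySem.Chars.isIn_iff_infix _ _).mp h
  · rintro ⟨_, ⟨t, ht, rfl⟩, h⟩
    exact ⟨t, ht, by rw [PySem.Str.isIn_eq]; exact (PySem.Chars.isIn_iff_infix _ _).mpr h⟩

theorem pvTermsB_eq : pvTermsB = pvExtsA.map String.toList ++ pvKwsA.map String.toList := rfl

-- ===== VERDICT (by name: the statement is the Claim_ definition above) =====
theorem is_irrelevant_py_spec : Claim_equal_is_irrelevant_py := by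
  intro url _
  show is_irrelevant_py url = is_irrelevant_py_alt url
  have hA : is_irrelevant_py url =
      (pvExtsA.any (fun t => PySem.Str.isIn t (PySem.Str.lower url)) ||
       pvKwsA.any (fun t => PySem.Str.isIn t (PySem.Str.lower url))) := by
    unfold is_irrelevant_py
    cases hx : pvExtsA.any (fun t => PySem.Str.isIn t (PySem.Str.lower url)) <;>
      cases hy : pvKwsA.any (fun t => PySem.Str.isIn t (PySem.Str.lower url)) <;>
        (simp only [hx, hy]; simp)
  rw [hA, Bool.eq_iff_iff]
  unfold is_irrelevant_py_alt
  rw [pvScanB_iff, pvTermsB_eq]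
  simp only [Bool.or_eq_true, pvAny_isIn_iff, List.mem_append]
  constructor
  · rintro (⟨t, ht, h⟩ | ⟨t, ht, h⟩)
    · exact ⟨t, Or.inl ht, h⟩
    · exact ⟨t, Or.inr ht, h⟩
  · rintro ⟨t, ht | ht, h⟩
    · exact Or.inl ⟨t, ht, h⟩
    · exact Or.inr ⟨t, ht, h⟩
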